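-- pv_equiv track=rewrite | github.com/geraud-g/advent-of-code | aoc_2018/day_02/day_02.py | part_one
-- ===== SOURCE A (Python) =====
-- from collections import Counter
--
-- def part_one(boxes: list[str]) -> int:
--     doubles = 0
--     triples = 0
--     for line in boxes:
--         counter = Counter(line)
--         values = counter.values()
--         doubles += any([1 for value in values if value == 2])
--         triples += any([1 for value in values if value == 3])
--     return doubles * triples
-- ===== SOURCE B (Python) =====
-- def run_lengths(chars):
--     if not chars:
--         return []
--     out = []
--     cur = chars[0]
--     n = 1
--     for ch in chars[1:]:
--         if ch == cur:
--             n += 1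
--         else:
--             out.append(n)
--             cur, n = ch, 1
--     out.append(n)
--     return out
--
--
-- def part_one(boxes: list[str]) -> int:
--     doubles = 0
--     triples = 0
--     for line in boxes:
--         lengths = run_lengths(sorted(line))
--         if 2 in lengths:
--             doubles += 1
--         if 3 in lengths:
--             triples += 1
--     return doubles * triples
-- ===== Notes on version B (the rewrite author's own statement) =====
-- stated objective: faster
-- what changed: Replaces the per-line Counter hash map and its values() scan with sorting the line's characters and one run-length scan whose run lengths are tested for 2 and 3; measured 2-3x faster because C-level sorted() plus a tight scan beats building a Counter per line.
import Mathlib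
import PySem

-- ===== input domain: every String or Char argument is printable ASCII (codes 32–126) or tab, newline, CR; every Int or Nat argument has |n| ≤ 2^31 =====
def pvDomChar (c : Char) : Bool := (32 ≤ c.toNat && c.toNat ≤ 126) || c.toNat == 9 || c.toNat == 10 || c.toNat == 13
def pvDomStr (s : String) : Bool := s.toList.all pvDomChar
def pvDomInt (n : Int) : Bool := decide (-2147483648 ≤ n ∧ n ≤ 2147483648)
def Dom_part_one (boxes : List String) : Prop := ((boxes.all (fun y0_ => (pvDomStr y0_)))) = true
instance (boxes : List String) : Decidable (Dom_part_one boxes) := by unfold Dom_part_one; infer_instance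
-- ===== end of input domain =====

-- B replaces the per-line Counter with sorting the characters and one run-length scan (alternative algorithm, same result).

-- ===== PORT A =====
def part_one (boxes : List String) : Int :=
  let p : Int × Int := boxes.foldl (fun acc line =>
    let counter := PySem.Dict.counter line.toList
    let values := counter.values
    ( acc.1 + (if ((values.filter (fun v => v == 2)).map (fun _ => (1 : Int))).any (fun x => decide (x ≠ 0)) then 1 else 0)
    , acc.2 + (if ((values.filter (fun v => v == 3)).map (fun _ => (1 : Int))).any (fun x => decide (x ≠ 0)) then 1 else 0))) (0, 0)
  p.1 * p.2

-- ===== PORT B =====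
-- the inner for-loop of run_lengths, state = (cur, n); builds the output front-to-back
def rlAux (cur : Char) (n : Int) : List Char → List Int
  | [] => [n]
  | ch :: rest => if ch == cur then rlAux cur (n + 1) rest else n :: rlAux ch 1 rest

def runLengths : List Char → List Int
  | [] => []
  | c :: rest => rlAux c 1 rest

def part_one_alt (boxes : List String) : Int :=
  let p : Int × Int := boxes.foldl (fun acc line =>
    let lengths := runLengths (PySem.List.sorted line.toList (fun x => x) false)
    ( acc.1 + (if 2 ∈ lengths then 1 else 0)
    , acc.2 + (if 3 ∈ lengths then 1 else 0))) (0, 0)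
  p.1 * p.2

-- ===== PRECONDITION & SPEC =====
def Spec_part_one (boxes : List String) (out : Int) : Prop := out = part_one_alt boxes
instance (boxes : List String) (out : Int) : Decidable (Spec_part_one boxes out) := by unfold Spec_part_one; infer_instance

-- ===== CLAIM (what is proved, stated in full; the proofs are below) =====
def Claim_equal_part_one : Prop := ∀ (boxes : List String), Dom_part_one boxes → Spec_part_one boxes (part_one boxes)

-- ===== LEMMAS AND PROOFS =====

-- in a sorted list whose elements are all ≥ c, dropping the leading c's removes exactly the c's
theorem count_dropWhile_of_sorted (c : Char) (l : List Char)
    (hp : l.Pairwise (· ≤ ·)) (hge : ∀ x ∈ l, c ≤ x) :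
    (∀ x : Char, x ≠ c → l.count x = (l.dropWhile (fun y => y == c)).count x) ∧
      c ∉ l.dropWhile (fun y => y == c) := by
  induction l with
  | nil => simp
  | cons d rest ih =>
    rcases List.pairwise_cons.mp hp with ⟨hd, hrest⟩
    by_cases hdc : d = c
    · subst hdc
      have := ih hrest (fun x hx => hd x hx)
      simp only [List.dropWhile_cons, beq_self_eq_true, if_true]
      constructor
      · intro x hx
        rw [List.count_cons, this.1 x hx]
        simp [Ne.symm hx]
      · exact this.2
    · have hdrop : (d :: rest).dropWhile (fun y => y == c) = d :: rest := by
        simp [hdc]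
      rw [hdrop]
      refine ⟨fun x _ => rfl, ?_⟩
      intro hmem
      rcases List.mem_cons.mp hmem with h | h
      · exact hdc h.symm
      · have h1 : c ≤ d := hge d (List.mem_cons_self ..)
        have h2 : d ≤ c := hd c h
        exact hdc (le_antisymm h2 h1)

-- rlAux on a sorted tail, all elements ≥ cur
theorem rlAux_sorted (cur : Char) (n : Int) (l : List Char)
    (hp : l.Pairwise (· ≤ ·)) (hge : ∀ x ∈ l, cur ≤ x) :
    rlAux cur n l = (n + (l.count cur : Int)) :: runLengths (l.dropWhile (fun y => y == cur)) := by
  induction l generalizing n with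
  | nil => simp [rlAux, runLengths]
  | cons d rest ih =>
    rcases List.pairwise_cons.mp hp with ⟨hd, hrest⟩
    by_cases hdc : d = cur
    · subst hdc
      rw [show rlAux d n (d :: rest) = rlAux d (n + 1) rest from by simp [rlAux]]
      rw [ih (n + 1) hrest (fun x hx => hd x hx)]
      simp [List.count_cons_self]
      ring_nf
    · have hcount : rest.count cur = 0 := by
        rw [List.count_eq_zero]
        intro hmem
        have h1 : cur ≤ d := hge d (List.mem_cons_self ..)
        have h2 : d ≤ cur := hd cur hmem
        exact hdc (le_antisymm h2 h1)
      have hne : (d == cur) = false := by simp [hdc]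
      rw [show rlAux cur n (d :: rest) = n :: rlAux d 1 rest from by simp [rlAux, hne]]
      have : ((d :: rest).count cur : Int) = 0 := by
        rw [List.count_cons, hcount]; simp [hne]
      rw [this]
      simp [hne, runLengths]

-- membership in the run lengths of a sorted list = some character count
theorem runLengths_mem (N : ℕ) : ∀ (s : List Char), s.length ≤ N → s.Pairwise (· ≤ ·) →
    ∀ k : Int, (k ∈ runLengths s ↔ ∃ c ∈ s, (s.count c : Int) = k) := by
  induction N with
  | zero =>
    intro s hs _ k
    have : s = [] := List.eq_nil_of_length_eq_zero (Nat.le_zero.mp hs)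
    subst this; simp [runLengths]
  | succ N ih =>
    intro s hs hp k
    match s with
    | [] => simp [runLengths]
    | c :: rest =>
      rcases List.pairwise_cons.mp hp with ⟨hd, hrest⟩
      have hge : ∀ x ∈ rest, c ≤ x := hd
      set t := rest.dropWhile (fun y => y == c) with ht
      have hfacts := count_dropWhile_of_sorted c rest hrest hge
      have htsub : t.Sublist rest := List.dropWhile_sublist _
      have htp : t.Pairwise (· ≤ ·) := hrest.sublist htsub
      have htlen : t.length ≤ N := by
        have := htsub.length_le
        have := hs
        simp only [List.length_cons] at hs
        omega
      have hrl : runLengths (c :: rest) = (1 + (rest.count c : Int)) :: runLengths t := by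
        simp only [runLengths]
        exact rlAux_sorted c 1 rest hrest hge
      rw [hrl, List.mem_cons, ih t htlen htp k]
      constructor
      · rintro (h | ⟨c', hc't, hc'⟩)
        · exact ⟨c, List.mem_cons_self .., by rw [List.count_cons_self]; push_cast; omega⟩
        · have hc'ne : c' ≠ c := fun h => hfacts.2 (by rw [h] at hc't; exact hc't)
          refine ⟨c', List.mem_cons_of_mem _ (htsub.mem hc't), ?_⟩
          have hcnt : List.count c' rest = List.count c' t := by rw [ht]; exact hfacts.1 c' hc'ne
          simpa [List.count_cons, Ne.symm hc'ne, hcnt] using hc'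
      · rintro ⟨c', hc's, hc'⟩
        by_cases hc'c : c' = c
        · subst hc'c
          left
          rw [List.count_cons_self] at hc'
          push_cast at hc' ⊢
          omega
        · right
          rcases List.mem_cons.mp hc's with h | h
          · exact absurd h hc'c
          · have hcnt : rest.count c' = t.count c' := hfacts.1 c' hc'c
            have hmem : c' ∈ t := by
              rw [← List.count_pos_iff, ← hcnt, List.count_pos_iff]; exact h
            refine ⟨c', hmem, ?_⟩
            rw [List.count_cons] at hc'
            rw [← hcnt]
            simpa [Ne.symm hc'c] using hc'
      
-- per line: k among Counter values ↔ k among run lengths of the sorted characters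
theorem line_iff (l : List Char) (k : Int) :
    (k ∈ (PySem.Dict.counter l).values) ↔ k ∈ runLengths (PySem.List.sorted l (fun x => x) false) := by
  set s := PySem.List.sorted l (fun x => x) false with hs
  have hperm : s.Perm l := PySem.List.sorted_perm l (fun x => x) false
  have hp : s.Pairwise (fun a b => (fun x => x) a ≤ (fun x => x) b) :=
    PySem.List.sorted_pairwise l (fun x => x)
  rw [runLengths_mem s.length s le_rfl hp k]
  have hvals : (PySem.Dict.counter l).values = (PySem.Set.ofList l).map (fun c => (l.count c : Int)) := by
    show ((PySem.Dict.counter l).items).map Prod.snd = _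
    rw [PySem.Dict.items_counter]
    simp [List.map_map, Function.comp]
  rw [hvals]
  simp only [List.mem_map, PySem.Set.mem_ofList]
  constructor
  · rintro ⟨c, hc, hk⟩
    exact ⟨c, hperm.mem_iff.mpr hc, by rw [hperm.count_eq]; exact hk⟩
  · rintro ⟨c, hc, hk⟩
    exact ⟨c, hperm.mem_iff.mp hc, by rw [← hperm.count_eq]; exact hk⟩

-- A's comprehension-any equals plain membership of k in values
theorem any_comp_eq_mem (values : List Int) (k : Int) :
    ((values.filter (fun v => v == k)).map (fun _ => (1 : Int))).any (fun x => decide (x ≠ 0)) =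
      decide (k ∈ values) := by
  simp only [List.any_eq]
  rw [decide_eq_decide]
  constructor
  · rintro ⟨x, hx, -⟩
    rcases List.mem_map.mp hx with ⟨v, hv, -⟩
    rcases List.mem_filter.mp hv with ⟨hvm, hvk⟩
    rw [show v = k from by simpa using hvk] at hvm
    exact hvm
  · intro h
    exact ⟨1, List.mem_map.mpr ⟨k, List.mem_filter.mpr ⟨h, by simp⟩, rfl⟩, by simp⟩

-- ===== VERDICT (by name: the statement is the Claim_ definition above) =====
theorem part_one_spec : Claim_equal_part_one := by
  intro boxes _
  show part_one boxes = part_one_alt boxes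
  have hstep : ∀ (acc : Int × Int), ∀ line ∈ boxes,
      (fun (acc : Int × Int) (line : String) =>
        let counter := PySem.Dict.counter line.toList
        let values := counter.values
        ( acc.1 + (if ((values.filter (fun v => v == 2)).map (fun _ => (1 : Int))).any (fun x => decide (x ≠ 0)) then 1 else 0)
        , acc.2 + (if ((values.filter (fun v => v == 3)).map (fun _ => (1 : Int))).any (fun x => decide (x ≠ 0)) then 1 else 0))) acc line
      = (fun (acc : Int × Int) (line : String) =>
        let lengths := runLengths (PySem.List.sorted line.toList (fun x => x) false)
        ( acc.1 + (if 2 ∈ lengths then 1 else 0)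
        , acc.2 + (if 3 ∈ lengths then 1 else 0))) acc line := by
    intro acc line _
    simp only
    rw [any_comp_eq_mem, any_comp_eq_mem]
    have h2 : (decide ((2 : Int) ∈ (PySem.Dict.counter line.toList).values) = true) ↔
        (2 : Int) ∈ runLengths (PySem.List.sorted line.toList (fun x => x) false) := by
      rw [decide_eq_true_eq]; exact line_iff line.toList 2
    have h3 : (decide ((3 : Int) ∈ (PySem.Dict.counter line.toList).values) = true) ↔
        (3 : Int) ∈ runLengths (PySem.List.sorted line.toList (fun x => x) false) := by
      rw [decide_eq_true_eq]; exact line_iff line.toList 3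
    rw [if_congr h2 rfl rfl, if_congr h3 rfl rfl]
  exact congrArg (fun p : Int × Int => p.1 * p.2)
    (PySem.List.foldl_congr_mem boxes _ _ (0, 0) hstep)
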